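-- pv_equiv track=rewrite | github.com/brycekroencke/workout_tracker | AutoWorkoutTracker/utils/workout_tracker_functions.py | vertical_movement
-- ===== SOURCE A (Python) =====
-- def vertical_movement(arr, threshold = 30):
--     net_vertical_movement = 0
--     for i in range(int((len(arr)-1) / 3)):
--         net_vertical_movement += arr[i][1] - arr[i+1][1]
--
--     if abs(net_vertical_movement) > threshold:
--         return True
--     else:
--         return False
-- ===== SOURCE B (Python) =====
-- def vertical_movement(arr, threshold=30):
--     # The loop's sum of consecutive differences telescopes to arr[0][1] - arr[m][1].
--     m = (len(arr) - 1) // 3 if arr else 0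
--     net = arr[0][1] - arr[m][1] if m > 0 else 0
--     return abs(net) > threshold
-- ===== Notes on version B (the rewrite author's own statement) =====
-- stated objective: alternative
-- what changed: The summed consecutive differences telescope, so B computes the net movement directly as arr[0][1]-arr[m][1] with no loop.
import Mathlib
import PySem

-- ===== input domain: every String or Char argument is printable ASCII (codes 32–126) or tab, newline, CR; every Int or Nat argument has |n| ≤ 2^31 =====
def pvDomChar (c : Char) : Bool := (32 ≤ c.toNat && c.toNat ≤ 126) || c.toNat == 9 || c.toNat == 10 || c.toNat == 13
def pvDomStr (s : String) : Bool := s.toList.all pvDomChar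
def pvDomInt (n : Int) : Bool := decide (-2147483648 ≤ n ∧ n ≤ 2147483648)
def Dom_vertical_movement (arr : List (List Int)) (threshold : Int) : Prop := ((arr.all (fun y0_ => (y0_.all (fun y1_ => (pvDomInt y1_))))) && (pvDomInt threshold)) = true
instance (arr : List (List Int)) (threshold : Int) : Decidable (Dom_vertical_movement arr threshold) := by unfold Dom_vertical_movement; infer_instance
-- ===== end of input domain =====

-- B replaces A's loop of consecutive differences with the telescoped value
-- arr[0][1] - arr[m][1] (m = (len(arr)-1)//3). Objective: alternative (closed form vs loop).

-- ===== PORT A =====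
-- A's loop state: Option Int because arr[i][1] may raise IndexError (none).
-- vmNetA arr k = value of net_vertical_movement after the first k loop iterations.
def vmNetA (arr : List (List Int)) : Nat → Option Int
  | 0 => some 0
  | k + 1 =>
    (vmNetA arr k).bind fun acc =>
      (PySem.List.pyGet? arr (k : Int)).bind fun rowi =>
        (PySem.List.pyGet? rowi 1).bind fun a =>
          (PySem.List.pyGet? arr ((k : Int) + 1)).bind fun rowj =>
            (PySem.List.pyGet? rowj 1).map fun b => acc + (a - b)

def vertical_movement (arr : List (List Int)) (threshold : Int) : Bool :=
  -- int((len(arr)-1)/3): for len ≥ 1 this is (len-1)//3; for len = 0 it is 0,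
  -- which Nat subtraction/division gives exactly.
  match vmNetA arr ((arr.length - 1) / 3) with
  | some net => decide (|net| > threshold)
  | none => false   -- unreachable under Pre_ (Python raises IndexError here)

-- ===== PORT B =====
def vertical_movement_alt (arr : List (List Int)) (threshold : Int) : Bool :=
  let m : Nat := (arr.length - 1) / 3
  if 0 < m then
    match (PySem.List.pyGet? arr (0 : Int)).bind (fun r => PySem.List.pyGet? r 1),
          (PySem.List.pyGet? arr (m : Int)).bind (fun r => PySem.List.pyGet? r 1) with
    | some a, some b => decide (|a - b| > threshold)
    | _, _ => false   -- unreachable under Pre_ (Python raises IndexError here)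
  else decide (|(0 : Int)| > threshold)

-- ===== PRECONDITION & SPEC =====
-- Pre_ excludes exactly the inputs where A raises IndexError: some row among the
-- first m+1 rows (the only ones the loop touches) has fewer than 2 entries.
def Pre_vertical_movement (arr : List (List Int)) (threshold : Int) : Prop :=
  0 < (arr.length - 1) / 3 →
    ∀ i < (arr.length - 1) / 3 + 1, 2 ≤ (arr.getD i []).length
instance (arr : List (List Int)) (threshold : Int) : Decidable (Pre_vertical_movement arr threshold) := by
  unfold Pre_vertical_movement; infer_instance

def pvWitness_vertical_movement : List (List Int) × Int :=
  ([[0, 1], [0, 2], [0, 3], [0, 4]], 30)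

def Spec_vertical_movement (arr : List (List Int)) (threshold : Int) (out : Bool) : Prop := out = vertical_movement_alt arr threshold
instance (arr : List (List Int)) (threshold : Int) (out : Bool) : Decidable (Spec_vertical_movement arr threshold out) := by unfold Spec_vertical_movement; infer_instance

-- ===== CLAIM (what is proved, stated in full; the proofs are below) =====
def Claim_equal_vertical_movement : Prop := ∀ (arr : List (List Int)) (threshold : Int), Dom_vertical_movement arr threshold → Pre_vertical_movement arr threshold → Spec_vertical_movement arr threshold (vertical_movement arr threshold)

-- ===== LEMMAS AND PROOFS =====

-- Under "rows 0..k are long enough", A's loop value telescopes to row0[1] - rowk[1].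
lemma get2_eq (arr : List (List Int)) (i : Nat) (hlt : i < arr.length)
    (hlen : 2 ≤ (arr.getD i []).length) :
    (PySem.List.pyGet? arr (i : Int)).bind (fun r => PySem.List.pyGet? r 1)
      = some ((arr.getD i []).getD 1 0) := by
  rw [PySem.List.pyGet?_natCast]
  rw [List.getElem?_eq_getElem hlt]
  simp only [Option.bind_some]
  have hg : arr.getD i [] = arr[i] := List.getD_eq_getElem arr [] hlt
  have h1 : 1 < (arr[i]).length := by rw [← hg]; omega
  rw [show (1 : Int) = ((1 : Nat) : Int) from rfl, PySem.List.pyGet?_natCast,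
    List.getElem?_eq_getElem h1, hg, List.getD_eq_getElem _ _ h1]

lemma vmNetA_telescope (arr : List (List Int)) (k : Nat) (hk : k < arr.length)
    (h : ∀ i < k + 1, 2 ≤ (arr.getD i []).length) :
    vmNetA arr k = some ((arr.getD 0 []).getD 1 0 - (arr.getD k []).getD 1 0) := by
  induction k with
  | zero => simp [vmNetA]
  | succ n ih =>
    have hn : n < arr.length := by omega
    have hrec := ih hn (fun i hi => h i (by omega))
    have hg1 := get2_eq arr n hn (h n (by omega))
    have hg2 := get2_eq arr (n + 1) hk (h (n + 1) (by omega))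
    simp only [vmNetA, hrec, Option.bind_some]
    rw [show ((n : Int) + 1) = ((n + 1 : Nat) : Int) by push_cast; ring] at *
    rcases Option.bind_eq_some_iff.mp hg1 with ⟨r1, hr1, hv1⟩
    rcases Option.bind_eq_some_iff.mp hg2 with ⟨r2, hr2, hv2⟩
    rw [hr1, Option.bind_some, hv1, Option.bind_some, hr2, Option.bind_some, hv2]
    simp only [Option.map_some]
    congr 1
    ring

lemma m_lt_length (arr : List (List Int)) (h : 0 < (arr.length - 1) / 3) :
    (arr.length - 1) / 3 < arr.length := by
  have h1 : 0 < arr.length := by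
    by_contra hc
    have : arr.length = 0 := by omega
    simp [this] at h
  have := Nat.div_le_self (arr.length - 1) 3
  omega

-- ===== VERDICT (by name: the statement is the Claim_ definition above) =====
theorem vertical_movement_spec : Claim_equal_vertical_movement := by
  intro arr threshold _ hpre
  unfold Spec_vertical_movement vertical_movement vertical_movement_alt
  by_cases hm : 0 < (arr.length - 1) / 3
  · have hlt := m_lt_length arr hm
    have hrows := hpre hm
    have htel := vmNetA_telescope arr ((arr.length - 1) / 3) hlt hrows
    have hg1 := get2_eq arr 0 (by omega) (hrows 0 (by omega))
    have hg2 := get2_eq arr ((arr.length - 1) / 3) hlt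
      (hrows ((arr.length - 1) / 3) (by omega))
    simp only [Int.natCast_zero] at hg1
    simp only [htel, hg1, hg2, if_pos hm]
  · have h0 : (arr.length - 1) / 3 = 0 := by omega
    simp [h0, vmNetA]
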